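-- pv_equiv track=rewrite | github.com/yunchien77/3D-pose-estimation-STCFormer | code/para/para_fix.py | filter_stable_regions
-- ===== SOURCE A (Python) =====
-- def filter_stable_regions(time, elec, begin_angle, rest_angle, begin_tolerance=20, rest_tolerance=4):
--     """
--     只過濾序列開頭和結尾的平穩區段
--
--     Parameters:
--     - time: 時間序列
--     - elec: 角度序列
--     - begin_angle: 起始角度
--     - rest_angle: 靜息角度
--     - tolerance: 判定為平穩區域的閾值
--
--     Returns:
--     - filtered_time: 過濾後的時間序列
--     - filtered_elec: 過濾後的角度序列
--     """
--     # 找出序列開頭的平穩區段結束點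
--     start_idx = 0
--     for i in range(len(elec)):
--         if abs(elec[i] - begin_angle) > begin_tolerance:
--             start_idx = i
--             break
--
--     # 從後往前找出序列結尾的平穩區段起始點
--     end_idx = len(elec) - 1
--     for i in range(len(elec)-1, -1, -1):
--         if abs(elec[i] - rest_angle) > rest_tolerance:
--             end_idx = i
--             break
--
--     # 過濾數據
--     filtered_time = time[start_idx:end_idx+1]
--     filtered_elec = elec[start_idx:end_idx+1]
--
--     return filtered_time, filtered_elec
-- ===== SOURCE B (Python) =====
-- def filter_stable_regions(time, elec, begin_angle, rest_angle, begin_tolerance=20, rest_tolerance=4):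
--     # One forward pass instead of A's two separate (forward + backward) break-scans.
--     start_idx = 0
--     end_idx = len(elec) - 1
--     found_start = False
--     for i, v in enumerate(elec):
--         if not found_start and abs(v - begin_angle) > begin_tolerance:
--             start_idx = i
--             found_start = True
--         if abs(v - rest_angle) > rest_tolerance:
--             end_idx = i
--     return time[start_idx:end_idx + 1], elec[start_idx:end_idx + 1]
-- ===== Notes on version B (the rewrite author's own statement) =====
-- stated objective: alternative
-- what changed: Replaces A's two independent break-scans (forward for the first deviating index, backward for the last) with a single forward pass over enumerate(elec) that maintains start_idx/found_start and keeps updating end_idx to the last deviating index.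
import Mathlib
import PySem

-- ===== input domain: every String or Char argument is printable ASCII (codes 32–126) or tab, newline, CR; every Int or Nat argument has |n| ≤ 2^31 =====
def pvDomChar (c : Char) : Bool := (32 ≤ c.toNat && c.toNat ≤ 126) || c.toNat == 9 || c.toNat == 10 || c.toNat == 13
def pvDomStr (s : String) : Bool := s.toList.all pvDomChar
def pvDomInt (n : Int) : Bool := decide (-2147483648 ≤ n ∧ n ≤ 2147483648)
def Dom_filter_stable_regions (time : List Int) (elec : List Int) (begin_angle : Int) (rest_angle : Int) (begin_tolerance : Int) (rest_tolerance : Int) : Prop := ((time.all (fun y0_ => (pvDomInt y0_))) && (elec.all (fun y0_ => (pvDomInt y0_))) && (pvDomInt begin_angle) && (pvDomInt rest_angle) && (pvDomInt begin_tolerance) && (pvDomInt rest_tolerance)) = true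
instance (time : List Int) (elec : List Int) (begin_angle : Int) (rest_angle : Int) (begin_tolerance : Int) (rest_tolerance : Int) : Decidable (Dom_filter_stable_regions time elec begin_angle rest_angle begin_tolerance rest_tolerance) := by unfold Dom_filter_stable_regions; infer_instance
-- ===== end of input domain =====

-- B replaces A's two independent break-scans with one forward pass over enumerate(elec); same cost, different decomposition.


-- ===== PORT A =====
-- forward scan with break: first index i with |elec[i]-ba| > bt, else the initial 0
def pvAStart (ba bt : Int) : List Int → Int → Int
  | [], _ => 0
  | x :: xs, i => if bt < |x - ba| then i else pvAStart ba bt xs (i + 1)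

-- backward scan with break over the reversed enumerated list: first match from the end, else default d
def pvAEnd (ra rt d : Int) : List (Int × Int) → Int
  | [] => d
  | (i, v) :: rest => if rt < |v - ra| then i else pvAEnd ra rt d rest

def filter_stable_regions (time : List Int) (elec : List Int) (begin_angle : Int) (rest_angle : Int) (begin_tolerance : Int) (rest_tolerance : Int) : List Int × List Int :=
  let s := pvAStart begin_angle begin_tolerance elec 0
  let e := pvAEnd rest_angle rest_tolerance ((elec.length : Int) - 1) ((PySem.List.enumerate elec).reverse)
  (PySem.List.slice time (some s) (some (e + 1)), PySem.List.slice elec (some s) (some (e + 1)))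

-- ===== PORT B =====
-- one loop step of Source B: state ((start_idx, found_start), end_idx), element (i, v)
def pvBStep (ba ra bt rt : Int) (st : (Int × Bool) × Int) (p : Int × Int) : (Int × Bool) × Int :=
  let st1 := if st.1.2 = false ∧ bt < |p.2 - ba| then (p.1, true) else st.1
  let e1 := if rt < |p.2 - ra| then p.1 else st.2
  (st1, e1)

def filter_stable_regions_alt (time : List Int) (elec : List Int) (begin_angle : Int) (rest_angle : Int) (begin_tolerance : Int) (rest_tolerance : Int) : List Int × List Int :=
  let st := (PySem.List.enumerate elec).foldl (pvBStep begin_angle rest_angle begin_tolerance rest_tolerance) ((0, false), (elec.length : Int) - 1)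
  (PySem.List.slice time (some st.1.1) (some (st.2 + 1)), PySem.List.slice elec (some st.1.1) (some (st.2 + 1)))

-- ===== PRECONDITION & SPEC =====
def Spec_filter_stable_regions (time : List Int) (elec : List Int) (begin_angle : Int) (rest_angle : Int) (begin_tolerance : Int) (rest_tolerance : Int) (out : List Int × List Int) : Prop := out = filter_stable_regions_alt time elec begin_angle rest_angle begin_tolerance rest_tolerance
instance (time : List Int) (elec : List Int) (begin_angle : Int) (rest_angle : Int) (begin_tolerance : Int) (rest_tolerance : Int) (out : List Int × List Int) : Decidable (Spec_filter_stable_regions time elec begin_angle rest_angle begin_tolerance rest_tolerance out) := by unfold Spec_filter_stable_regions; infer_instance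

-- ===== CLAIM (what is proved, stated in full; the proofs are below) =====
def Claim_equal_filter_stable_regions : Prop := ∀ (time : List Int) (elec : List Int) (begin_angle : Int) (rest_angle : Int) (begin_tolerance : Int) (rest_tolerance : Int), Dom_filter_stable_regions time elec begin_angle rest_angle begin_tolerance rest_tolerance → Spec_filter_stable_regions time elec begin_angle rest_angle begin_tolerance rest_tolerance (filter_stable_regions time elec begin_angle rest_angle begin_tolerance rest_tolerance)

-- ===== LEMMAS AND PROOFS =====

-- the two independent components of pvBStep, as stand-alone folds
def pvG1 (ba bt : Int) (st : Int × Bool) (p : Int × Int) : Int × Bool :=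
  if st.2 = false ∧ bt < |p.2 - ba| then (p.1, true) else st

def pvG2 (ra rt : Int) (e : Int) (p : Int × Int) : Int :=
  if rt < |p.2 - ra| then p.1 else e

-- B's fold splits into the two component folds
theorem pvFoldSplit (ba ra bt rt : Int) (l : List (Int × Int)) :
    ∀ (sf : Int × Bool) (e : Int),
      l.foldl (pvBStep ba ra bt rt) (sf, e) =
        (l.foldl (pvG1 ba bt) sf, l.foldl (pvG2 ra rt) e) := by
  induction l with
  | nil => intro sf e; rfl
  | cons p l ih =>
    intro sf e
    simp only [List.foldl_cons]
    rw [show pvBStep ba ra bt rt (sf, e) p = (pvG1 ba bt sf p, pvG2 ra rt e p) from rfl]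
    exact ih _ _

-- once found_start is true the start state never changes
theorem pvG1_found (ba bt : Int) (l : List (Int × Int)) :
    ∀ (s : Int), l.foldl (pvG1 ba bt) (s, true) = (s, true) := by
  induction l with
  | nil => intro s; rfl
  | cons p l ih => intro s; simp only [List.foldl_cons, pvG1]; simp; exact ih s

-- B's start fold equals A's forward break-scan
theorem pvStartEq (ba bt : Int) (xs : List Int) :
    ∀ (i : Int), ((PySem.List.enumerate xs i).foldl (pvG1 ba bt) (0, false)).1 =
      pvAStart ba bt xs i := by
  induction xs with
  | nil => intro i; rfl
  | cons x xs ih =>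
    intro i
    rw [PySem.List.enumerate_cons]
    simp only [List.foldl_cons, pvAStart]
    by_cases h : bt < |x - ba|
    · rw [show pvG1 ba bt (0, false) (i, x) = (i, true) from by simp [pvG1, h]]
      rw [pvG1_found, if_pos h]
    · rw [show pvG1 ba bt (0, false) (i, x) = (0, false) from by simp [pvG1, h]]
      rw [if_neg h]
      exact ih (i + 1)

-- appending one element to A's backward scan input = pre-updating the default
theorem pvAEnd_append (ra rt : Int) (m : List (Int × Int)) :
    ∀ (e : Int) (p : Int × Int),
      pvAEnd ra rt e (m ++ [p]) = pvAEnd ra rt (pvG2 ra rt e p) m := by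
  induction m with
  | nil =>
    intro e p
    simp only [List.nil_append, pvAEnd, pvG2]
  | cons q m ih =>
    intro e p
    obtain ⟨qi, qv⟩ := q
    simp only [List.cons_append, pvAEnd]
    by_cases h : rt < |qv - ra|
    · simp [h]
    · simp only [if_neg h]; exact ih e p

-- B's end fold equals A's backward break-scan over the reversed list
theorem pvEndEq (ra rt : Int) (l : List (Int × Int)) :
    ∀ (e : Int), l.foldl (pvG2 ra rt) e = pvAEnd ra rt e l.reverse := by
  induction l with
  | nil => intro e; rfl
  | cons p l ih =>
    intro e
    simp only [List.foldl_cons, List.reverse_cons]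
    rw [pvAEnd_append, ih]

-- ===== VERDICT (by name: the statement is the Claim_ definition above) =====
theorem filter_stable_regions_spec : Claim_equal_filter_stable_regions := by
  intro time elec ba ra bt rt _
  unfold Spec_filter_stable_regions filter_stable_regions filter_stable_regions_alt
  dsimp only
  rw [pvFoldSplit]
  dsimp only
  rw [pvStartEq, pvEndEq]
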